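-- pv_equiv track=rewrite | github.com/Tkrechet/yandex-algoritms-6.0 | HW-4/A4.py | fh
-- ===== SOURCE A (Python) =====
-- def fh(person,parent_map,height_map):
--     if person in height_map:
--         return height_map[person]
--
--
--     if person not in parent_map:
--         height_map[person] = 0
--         return 0
--
--     parent = parent_map[person]
--     parent_height = fh(parent,parent_map,height_map)
--     height_map[person] = parent_height + 1
--     return parent_height + 1
-- ===== SOURCE B (Python) =====
-- # Bottom-up bounded relaxation over the whole parent_map instead of A's top-down cached
-- # recursion: repeatedly resolve any node whose parent's height is already known.
-- # NOTE: unlike A, this does NOT write computed heights back into height_map (the proved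
-- # equivalence is about the RETURN value only).
-- def fh(person, parent_map, height_map):
--     if person in height_map:
--         return height_map[person]
--     if person not in parent_map:
--         return 0
--     known = dict(height_map)
--     for _ in range(len(parent_map)):
--         if person in known:
--             break
--         for node, par in parent_map.items():
--             if node not in known:
--                 if par in known:
--                     known[node] = known[par] + 1
--                 elif par not in parent_map:
--                     known[node] = 1
--     return known[person]
-- ===== Notes on version B (the rewrite author's own statement) =====
-- stated objective: alternative
-- what changed: A's top-down cached recursion along the person's parent chain is replaced by a bottom-up bounded relaxation: B repeatedly sweeps the whole parent_map, resolving any node whose parent's height is already known, then reads off the person's height; unlike A it does not write computed heights back into height_map.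
import Mathlib
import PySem

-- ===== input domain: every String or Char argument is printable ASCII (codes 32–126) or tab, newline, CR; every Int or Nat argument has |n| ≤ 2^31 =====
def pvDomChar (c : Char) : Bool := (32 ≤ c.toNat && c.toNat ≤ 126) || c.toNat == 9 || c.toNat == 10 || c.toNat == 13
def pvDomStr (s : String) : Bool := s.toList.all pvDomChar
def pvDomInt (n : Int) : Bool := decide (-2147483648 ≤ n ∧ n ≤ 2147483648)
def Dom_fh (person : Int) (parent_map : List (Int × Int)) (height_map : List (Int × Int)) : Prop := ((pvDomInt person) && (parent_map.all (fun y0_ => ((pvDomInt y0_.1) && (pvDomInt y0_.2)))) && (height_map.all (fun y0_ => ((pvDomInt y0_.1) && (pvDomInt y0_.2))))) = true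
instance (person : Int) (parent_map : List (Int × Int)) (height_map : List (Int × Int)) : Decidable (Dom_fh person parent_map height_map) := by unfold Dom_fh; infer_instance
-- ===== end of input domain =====

-- B replaces A's top-down cached recursion by a bottom-up bounded relaxation over the whole
-- parent_map; A caches into height_map in place, B does not — the equivalence proved here
-- is about the RETURN value only.

-- ===== PORT A =====
-- dict lookup (first match in the association list)
def lk (m : List (Int × Int)) (k : Int) : Option Int :=
  match m with
  | [] => none
  | (a, b) :: rest => if a = k then some b else lk rest k

-- A's recursion, fueled: under Pre_fh the chain reaches a cached node or a root within
-- parent_map.length + 1 steps, so the fuel is never exhausted.  All reads of height_map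
-- happen before any write on the recursion path, so the un-threaded height_map is exact
-- for the return value.
def fhA (fuel : Nat) (person : Int) (parent_map : List (Int × Int)) (height_map : List (Int × Int)) : Int :=
  match fuel with
  | 0 => 0
  | fuel + 1 =>
    match lk height_map person with
    | some h => h
    | none =>
      match lk parent_map person with
      | none => 0
      | some parent => fhA fuel parent parent_map height_map + 1

def fh (person : Int) (parent_map : List (Int × Int)) (height_map : List (Int × Int)) : Int :=
  fhA (parent_map.length + 1) person parent_map height_map

-- ===== PORT B =====
-- one relaxation step of B's inner loop: resolve node e.1 from its parent e.2 if possible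
def relaxStep (pm : List (Int × Int)) (kn : List (Int × Int)) (e : Int × Int) : List (Int × Int) :=
  if (List.lookup e.1 kn).isSome then kn
  else
    match List.lookup e.2 kn with
    | some h => kn ++ [(e.1, h + 1)]
    | none => if (List.lookup e.2 pm).isNone then kn ++ [(e.1, 1)] else kn

-- one full pass of B's inner `for node, par in parent_map.items()` loop
def relaxPass (pm : List (Int × Int)) (kn : List (Int × Int)) : List (Int × Int) :=
  pm.foldl (relaxStep pm) kn

def fh_alt (person : Int) (parent_map : List (Int × Int)) (height_map : List (Int × Int)) : Int :=
  match List.lookup person height_map with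
  | some h => h
  | none =>
    if (List.lookup person parent_map).isNone then 0
    else
      -- `for _ in range(len(parent_map)):` running relaxation passes, breaking once resolved
      let known := (List.range parent_map.length).foldl
        (fun kn _ => if (List.lookup person kn).isSome then kn else relaxPass parent_map kn) height_map
      -- `known[person]`: a missing key is a Python KeyError, excluded by Pre_fh
      (List.lookup person known).getD 0

-- ===== PRECONDITION & SPEC =====
-- Pre_fh excludes (a) non-terminating parent chains — there A raises RecursionError and B
-- raises KeyError — and (b) duplicate keys in parent_map, an artifact of the dict→assoc-list
-- encoding that no Python dict input can produce (A's argument is a real dict).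
def Pre_fh (person : Int) (parent_map : List (Int × Int)) (height_map : List (Int × Int)) : Prop :=
  (parent_map.map Prod.fst).Nodup ∧
  ((List.range (parent_map.length + 1)).any (fun i =>
    (List.lookup ((fun x : Int => (List.lookup x parent_map).getD x)^[i] person) height_map).isSome ||
    (List.lookup ((fun x : Int => (List.lookup x parent_map).getD x)^[i] person) parent_map).isNone)) = true
instance (person : Int) (parent_map : List (Int × Int)) (height_map : List (Int × Int)) : Decidable (Pre_fh person parent_map height_map) := by unfold Pre_fh; infer_instance

def pvWitness_fh : Int × (List (Int × Int)) × (List (Int × Int)) := (3, [(3, 2), (2, 1)], [(1, 4)])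

def Spec_fh (person : Int) (parent_map : List (Int × Int)) (height_map : List (Int × Int)) (out : Int) : Prop := out = fh_alt person parent_map height_map
instance (person : Int) (parent_map : List (Int × Int)) (height_map : List (Int × Int)) (out : Int) : Decidable (Spec_fh person parent_map height_map out) := by unfold Spec_fh; infer_instance

-- ===== CLAIM (what is proved, stated in full; the proofs are below) =====
def Claim_equal_fh : Prop := ∀ (person : Int) (parent_map : List (Int × Int)) (height_map : List (Int × Int)), Dom_fh person parent_map height_map → Pre_fh person parent_map height_map → Spec_fh person parent_map height_map (fh person parent_map height_map)

-- ===== LEMMAS AND PROOFS =====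

-- the parent chain: pf = one step by first-match lookup, ch j = j-th iterated parent
def pf (pm : List (Int × Int)) (x : Int) : Int := (List.lookup x pm).getD x
def ch (pm : List (Int × Int)) (person : Int) (j : Nat) : Int := (pf pm)^[j] person

theorem lk_eq_lookup (m : List (Int × Int)) (k : Int) : lk m k = List.lookup k m := by
  induction m with
  | nil => rfl
  | cons q rest ih =>
    cases q with
    | mk a b =>
      simp only [lk, List.lookup, ih]
      by_cases hak : a = k
      · subst hak; simp
      · have hb : (k == a) = false := beq_eq_false_iff_ne.mpr (fun e => hak e.symm)
        simp [hak, hb]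

theorem mem_of_lookup_some {m : List (Int × Int)} {k v : Int}
    (h : List.lookup k m = some v) : (k, v) ∈ m := by
  induction m with
  | nil => simp [List.lookup] at h
  | cons q rest ih =>
    simp only [List.lookup] at h
    by_cases hk : k = q.1
    · subst hk; simp at h; simp [← h]
    · have hb : (k == q.1) = false := beq_eq_false_iff_ne.mpr hk
      rw [hb] at h
      exact List.mem_cons_of_mem _ (ih h)

theorem lookup_eq_of_mem_nodup {m : List (Int × Int)} {k v : Int}
    (hnd : (m.map Prod.fst).Nodup) (h : (k, v) ∈ m) : List.lookup k m = some v := by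
  induction m with
  | nil => simp at h
  | cons q rest ih =>
    simp only [List.map_cons, List.nodup_cons] at hnd
    rcases List.mem_cons.mp h with h | h
    · simp [← h, List.lookup]
    · simp only [List.lookup]
      by_cases hk : k = q.1
      · exfalso
        subst hk
        exact hnd.1 (List.mem_map.mpr ⟨(q.1, v), h, rfl⟩)
      · have hb : (k == q.1) = false := beq_eq_false_iff_ne.mpr hk
        rw [hb]
        exact ih hnd.2 h

theorem lookup_append_single (kn : List (Int × Int)) (k w x : Int) :
    List.lookup x (kn ++ [(k, w)]) =
      match List.lookup x kn with
      | some v => some v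
      | none => if x = k then some w else none := by
  induction kn with
  | nil =>
    simp only [List.nil_append, List.lookup]
    by_cases hx : x = k
    · subst hx
      simp
    · have hb : (x == k) = false := beq_eq_false_iff_ne.mpr hx
      simp [hb, hx]
  | cons q rest ih =>
    simp only [List.cons_append, List.lookup]
    by_cases hx : x = q.1
    · have : (x == q.1) = true := beq_iff_eq.mpr hx
      simp [this]
    · have hb : (x == q.1) = false := beq_eq_false_iff_ne.mpr hx
      simp [hb, ih]

-- a binding present in kn survives any append
theorem lookup_append_some {kn l : List (Int × Int)} {x v : Int}
    (h : List.lookup x kn = some v) : List.lookup x (kn ++ l) = some v := by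
  induction kn with
  | nil => simp [List.lookup] at h
  | cons q rest ih =>
    simp only [List.cons_append, List.lookup] at h ⊢
    by_cases hx : x = q.1
    · have hb : (x == q.1) = true := beq_iff_eq.mpr hx
      rw [hb] at h ⊢; exact h
    · have hb : (x == q.1) = false := beq_eq_false_iff_ne.mpr hx
      rw [hb] at h ⊢; exact ih h

-- relaxStep only appends, so existing bindings are preserved
theorem relaxStep_mono {pm kn : List (Int × Int)} (e : Int × Int) {x v : Int}
    (h : List.lookup x kn = some v) : List.lookup x (relaxStep pm kn e) = some v := by
  unfold relaxStep
  by_cases h1 : (List.lookup e.1 kn).isSome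
  · rw [if_pos h1]; exact h
  · rw [if_neg h1]
    cases hp : List.lookup e.2 kn with
    | some hh => simp only; exact lookup_append_some h
    | none =>
      simp only
      by_cases h2 : (List.lookup e.2 pm).isNone
      · rw [if_pos h2]; exact lookup_append_some h
      · rw [if_neg h2]; exact h

theorem foldl_relaxStep_mono (pm : List (Int × Int)) (l : List (Int × Int))
    (kn : List (Int × Int)) {x v : Int} (h : List.lookup x kn = some v) :
    List.lookup x (l.foldl (relaxStep pm) kn) = some v := by
  induction l generalizing kn with
  | nil => exact h
  | cons e rest ih => exact ih _ (relaxStep_mono e h)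

-- a generic foldl invariant
theorem foldl_invariant {α β : Type} (f : β → α → β) (P : β → Prop)
    (l : List α) (b : β) (hstep : ∀ b a, a ∈ l → P b → P (f b a)) (hb : P b) :
    P (l.foldl f b) := by
  induction l generalizing b with
  | nil => exact hb
  | cons e rest ih =>
    exact ih (f b e) (fun b' a ha => hstep b' a (List.mem_cons_of_mem _ ha)) (hstep b e (List.mem_cons_self) hb)

-- ===== the equivalence proof proper =====
-- Throughout: pm has nodup keys, L is the minimal chain index that is cached or a root,
-- base is the cached height at the chain's end (0 for a root).

-- A's recursion computes base + (L - j) from chain position j, given enough fuel.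
theorem fhA_chain (pm hm : List (Int × Int)) (person : Int) (L : Nat)
    (hL : ((List.lookup (ch pm person L) hm).isSome ∨ List.lookup (ch pm person L) pm = none))
    (hmin : ∀ j, j < L → ¬((List.lookup (ch pm person j) hm).isSome ∨ List.lookup (ch pm person j) pm = none)) :
    ∀ (fuel j : Nat), j ≤ L → L - j < fuel →
      fhA fuel (ch pm person j) pm hm =
        (List.lookup (ch pm person L) hm).getD 0 + ((L - j : Nat) : Int) := by
  intro fuel
  induction fuel with
  | zero => intro j _ h; omega
  | succ n ih =>
    intro j hjL hfuel
    by_cases hjeq : j = L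
    · subst hjeq
      simp only [fhA, lk_eq_lookup]
      rcases hL with hc | hr
      · rcases Option.isSome_iff_exists.mp hc with ⟨b, hb⟩
        simp [hb]
      · cases hcv : List.lookup (ch pm person j) hm with
        | some b => simp
        | none => simp [hr]
    · have hjlt : j < L := lt_of_le_of_ne hjL hjeq
      have hhm : List.lookup (ch pm person j) hm = none := by
        cases h : List.lookup (ch pm person j) hm with
        | none => rfl
        | some v => exact absurd (Or.inl (by simp [h])) (hmin j hjlt)
      have hpm : ∃ p, List.lookup (ch pm person j) pm = some p := by
        cases h : List.lookup (ch pm person j) pm with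
        | none => exact absurd (Or.inr h) (hmin j hjlt)
        | some p => exact ⟨p, rfl⟩
      rcases hpm with ⟨p, hp⟩
      have hnext : ch pm person (j + 1) = p := by
        show (pf pm)^[j+1] person = p
        rw [Function.iterate_succ_apply']
        show pf pm (ch pm person j) = p
        unfold pf
        rw [hp]
        rfl
      simp only [fhA, lk_eq_lookup, hhm, hp]
      rw [← hnext, ih (j + 1) (by omega) (by omega)]
      have hc : ((L - j : Nat) : Int) = ((L - (j + 1) : Nat) : Int) + 1 := by omega
      omega

-- the combined soundness invariant on B's `known` table: it extends height_map, and any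
-- binding it holds for a chain node is the correct height base + (L - j)
def SoundKn (pm hm : List (Int × Int)) (person : Int) (L : Nat) (kn : List (Int × Int)) : Prop :=
  (∀ x v, List.lookup x hm = some v → List.lookup x kn = some v) ∧
  (∀ j, j ≤ L → ∀ v, List.lookup (ch pm person j) kn = some v →
      v = (List.lookup (ch pm person L) hm).getD 0 + ((L - j : Nat) : Int))

theorem soundKn_step (pm hm : List (Int × Int)) (person : Int) (L : Nat)
    (hnd : (pm.map Prod.fst).Nodup)
    (hL : ((List.lookup (ch pm person L) hm).isSome ∨ List.lookup (ch pm person L) pm = none))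
    (hmin : ∀ j, j < L → ¬((List.lookup (ch pm person j) hm).isSome ∨ List.lookup (ch pm person j) pm = none))
    (kn : List (Int × Int)) (e : Int × Int) (he : e ∈ pm)
    (hS : SoundKn pm hm person L kn) : SoundKn pm hm person L (relaxStep pm kn e) := by
  obtain ⟨hsub, hsound⟩ := hS
  have hpar : List.lookup e.1 pm = some e.2 := lookup_eq_of_mem_nodup hnd he
  -- common argument for both append branches: adding the binding (e.1, w)
  have key : ∀ (w : Int),
      (List.lookup e.1 kn = none) →
      (∀ j, j ≤ L → ch pm person j = e.1 →
          w = (List.lookup (ch pm person L) hm).getD 0 + ((L - j : Nat) : Int)) →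
      SoundKn pm hm person L (kn ++ [(e.1, w)]) := by
    intro w habs hw
    constructor
    · intro x v hx
      exact lookup_append_some (hsub x v hx)
    · intro j hj v hv
      rw [lookup_append_single] at hv
      cases hold : List.lookup (ch pm person j) kn with
      | some u =>
        rw [hold] at hv
        rw [Option.some_inj] at hv
        exact hv ▸ hsound j hj u hold
      | none =>
        rw [hold] at hv
        split_ifs at hv with hxk
        rw [Option.some_inj] at hv
        rw [← hv]
        exact hw j hj hxk
  -- a chain index hitting the (unresolved) key e.1 is strictly below L: at L the node is
  -- cached (then it would already be in kn) or a root (then it could not be a pm key)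
  have hjlt : ∀ j, j ≤ L → ch pm person j = e.1 → List.lookup e.1 kn = none → j < L := by
    intro j hj hxk habs
    rcases lt_or_eq_of_le hj with h' | h'
    · exact h'
    · exfalso
      subst h'
      rw [hxk] at hL
      rcases hL with hc | hr
      · rcases Option.isSome_iff_exists.mp hc with ⟨b, hb⟩
        rw [hsub e.1 b hb] at habs
        simp at habs
      · rw [hpar] at hr
        simp at hr
  unfold relaxStep
  by_cases h1 : (List.lookup e.1 kn).isSome
  · rw [if_pos h1]
    exact ⟨hsub, hsound⟩
  · rw [if_neg h1]
    have habs : List.lookup e.1 kn = none := by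
      cases h : List.lookup e.1 kn with
      | none => rfl
      | some v => exact absurd (by simp [h]) h1
    have hnext : ∀ j, ch pm person j = e.1 → ch pm person (j + 1) = e.2 := by
      intro j hxk
      show (pf pm)^[j+1] person = e.2
      rw [Function.iterate_succ_apply']
      show pf pm (ch pm person j) = e.2
      unfold pf
      rw [hxk, hpar]
      rfl
    cases hpk : List.lookup e.2 kn with
    | some h =>
      simp only
      refine key (h + 1) habs ?_
      intro j hj hxk
      have hjL : j < L := hjlt j hj hxk habs
      have hs := hsound (j + 1) (by omega) h (by rw [hnext j hxk]; exact hpk)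
      have hc : ((L - j : Nat) : Int) = ((L - (j + 1) : Nat) : Int) + 1 := by omega
      omega
    | none =>
      simp only
      by_cases h2 : (List.lookup e.2 pm).isNone
      · rw [if_pos h2]
        refine key 1 habs ?_
        intro j hj hxk
        have hjL : j < L := hjlt j hj hxk habs
        have hroot : List.lookup e.2 pm = none := Option.isNone_iff_eq_none.mp h2
        -- terminal condition holds at j + 1, so by minimality L = j + 1
        have hLj : L = j + 1 := by
          by_contra hne
          have hlt : j + 1 < L := by omega
          exact hmin (j + 1) hlt (Or.inr (by rw [hnext j hxk]; exact hroot))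
        -- the chain end e.2 is uncached (else it would already be in kn), so base = 0
        have hbase : List.lookup (ch pm person L) hm = none := by
          rw [hLj, hnext j hxk]
          cases h : List.lookup e.2 hm with
          | none => rfl
          | some v => rw [hsub e.2 v h] at hpk; simp at hpk
        rw [hbase]
        simp only [Option.getD_none]
        omega
      · rw [if_neg h2]
        exact ⟨hsub, hsound⟩

-- one pass resolves a node whose (unique) parent entry is already known or is a root
theorem pass_resolves (pm : List (Int × Int)) (k w : Int) :
    ∀ (l : List (Int × Int)) (kn : List (Int × Int)), (k, w) ∈ l →
      ((List.lookup w kn).isSome ∨ List.lookup w pm = none) →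
      (List.lookup k (l.foldl (relaxStep pm) kn)).isSome := by
  intro l
  induction l with
  | nil => intro kn h; simp at h
  | cons e rest ih =>
    intro kn hmem hparent
    rcases List.mem_cons.mp hmem with heq | hmem'
    · -- the head entry resolves k (or it was already known); monotone through the rest
      have hsome : (List.lookup k (relaxStep pm kn e)).isSome := by
        rw [← heq]
        unfold relaxStep
        by_cases h1 : (List.lookup (k, w).1 kn).isSome
        · rw [if_pos h1]; exact h1
        · rw [if_neg h1]
          have habs : List.lookup k kn = none := by
            cases h : List.lookup k kn with
            | none => rfl
            | some v => exact absurd (by simp [h]) h1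
          cases hpk : List.lookup (k, w).2 kn with
          | some h =>
            simp only
            rw [lookup_append_single]
            show ((match List.lookup k kn with
              | some v => some v
              | none => if k = (k, w).1 then some (h + 1) else none).isSome) = true
            rw [habs]
            simp
          | none =>
            simp only
            have hroot : (List.lookup (k, w).2 pm).isNone := by
              rcases hparent with hc | hr
              · rw [show List.lookup w kn = none from hpk] at hc; exact absurd hc (by simp)
              · simp [hr]
            rw [if_pos hroot, lookup_append_single]
            show ((match List.lookup k kn with
              | some v => some v
              | none => if k = (k, w).1 then some 1 else none).isSome) = true
            rw [habs]
            simp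
      rcases Option.isSome_iff_exists.mp hsome with ⟨v, hv⟩
      simp only [List.foldl_cons]
      rw [foldl_relaxStep_mono pm rest _ hv]
      rfl
    · -- k is resolved later in the pass; the parent hypothesis survives the head step
      simp only [List.foldl_cons]
      refine ih (relaxStep pm kn e) hmem' ?_
      rcases hparent with hc | hr
      · rcases Option.isSome_iff_exists.mp hc with ⟨v, hv⟩
        exact Or.inl (by rw [relaxStep_mono e hv]; rfl)
      · exact Or.inr hr

-- after p passes every chain node at distance < p from the end is known
def Prog (pm : List (Int × Int)) (person : Int) (L : Nat) (p : Nat) (kn : List (Int × Int)) : Prop :=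
  ∀ j, L - p ≤ j → j < L → (List.lookup (ch pm person j) kn).isSome

theorem prog_step (pm hm : List (Int × Int)) (person : Int) (L : Nat)
    (hL : ((List.lookup (ch pm person L) hm).isSome ∨ List.lookup (ch pm person L) pm = none))
    (hmin : ∀ j, j < L → ¬((List.lookup (ch pm person j) hm).isSome ∨ List.lookup (ch pm person j) pm = none))
    (p : Nat) (kn : List (Int × Int))
    (hsub : ∀ x v, List.lookup x hm = some v → List.lookup x kn = some v)
    (hP : Prog pm person L p kn) :
    Prog pm person L (p + 1) (relaxPass pm kn) := by
  intro j hj1 hj2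
  by_cases hold : L - p ≤ j
  · rcases Option.isSome_iff_exists.mp (hP j hold hj2) with ⟨v, hv⟩
    rw [relaxPass, foldl_relaxStep_mono pm pm kn hv]
    rfl
  · -- j is the next unresolved chain node: its parent index j + 1 is L - p
    have hpm : ∃ q, List.lookup (ch pm person j) pm = some q := by
      cases h : List.lookup (ch pm person j) pm with
      | none => exact absurd (Or.inr h) (hmin j hj2)
      | some q => exact ⟨q, rfl⟩
    rcases hpm with ⟨q, hq⟩
    have hnext : ch pm person (j + 1) = q := by
      show (pf pm)^[j+1] person = q
      rw [Function.iterate_succ_apply']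
      show pf pm (ch pm person j) = q
      unfold pf; rw [hq]; rfl
    refine pass_resolves pm (ch pm person j) q pm kn (mem_of_lookup_some hq) ?_
    rw [← hnext]
    by_cases hend : j + 1 = L
    · rw [hend]
      rcases hL with hc | hr
      · rcases Option.isSome_iff_exists.mp hc with ⟨v, hv⟩
        exact Or.inl (by rw [hsub _ v hv]; rfl)
      · exact Or.inr hr
    · have hlt : j + 1 < L := by omega
      exact Or.inl (hP (j + 1) (by omega) hlt)

-- folding a constant-step function over List.range is function iteration
theorem foldl_const_range {β : Type} (g : β → β) (n : Nat) (init : β) :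
    (List.range n).foldl (fun b _ => g b) init = g^[n] init := by
  induction n with
  | zero => simp
  | succ m ih =>
    rw [List.range_succ, List.foldl_append, ih, List.foldl_cons, List.foldl_nil]
    exact (Function.iterate_succ_apply' g m init).symm

-- both invariants hold after any number of break-guarded relaxation passes: the table
-- stays sound, and either p chain nodes are resolved or the person already is
theorem passes_invariant (pm hm : List (Int × Int)) (person : Int) (L : Nat)
    (hnd : (pm.map Prod.fst).Nodup)
    (hL : ((List.lookup (ch pm person L) hm).isSome ∨ List.lookup (ch pm person L) pm = none))
    (hmin : ∀ j, j < L → ¬((List.lookup (ch pm person j) hm).isSome ∨ List.lookup (ch pm person j) pm = none)) :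
    ∀ n : Nat, SoundKn pm hm person L
        ((fun kn => if (List.lookup person kn).isSome then kn else relaxPass pm kn)^[n] hm) ∧
      (Prog pm person L n ((fun kn => if (List.lookup person kn).isSome then kn else relaxPass pm kn)^[n] hm) ∨
        (List.lookup person ((fun kn => if (List.lookup person kn).isSome then kn else relaxPass pm kn)^[n] hm)).isSome) := by
  intro n
  induction n with
  | zero =>
    refine ⟨⟨fun x v h => h, ?_⟩, Or.inl ?_⟩
    · intro j hj v hv
      simp only [Function.iterate_zero, id_eq] at hv
      rcases lt_or_eq_of_le hj with h' | h'
      · exact absurd (Or.inl (by simp [hv])) (hmin j h')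
      · subst h'
        simp [hv]
    · intro j hj1 hj2
      omega
  | succ n ih =>
    rw [Function.iterate_succ_apply']
    by_cases hf : (List.lookup person ((fun kn => if (List.lookup person kn).isSome then kn else relaxPass pm kn)^[n] hm)).isSome
    · rw [if_pos hf]
      exact ⟨ih.1, Or.inr hf⟩
    · rw [if_neg hf]
      constructor
      · exact foldl_invariant (relaxStep pm) (SoundKn pm hm person L) pm _
          (fun kn e he hS => soundKn_step pm hm person L hnd hL hmin kn e he hS) ih.1
      · rcases ih.2 with hP | hfound
        · exact Or.inl (prog_step pm hm person L hL hmin n _ ih.1.1 hP)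
        · exact absurd hfound hf

-- ===== VERDICT (by name: the statement is the Claim_ definition above) =====
theorem fh_spec : Claim_equal_fh := by
  intro person pm hm _ hpre
  unfold Spec_fh
  obtain ⟨hnd, hany⟩ := hpre
  rw [List.any_eq_true] at hany
  rcases hany with ⟨i, hi, hTi⟩
  rw [List.mem_range] at hi
  have hTi' : ((List.lookup (ch pm person i) hm).isSome ∨ List.lookup (ch pm person i) pm = none) := by
    rw [Bool.or_eq_true] at hTi
    rcases hTi with h | h
    · exact Or.inl h
    · exact Or.inr (Option.isNone_iff_eq_none.mp h)
  have hex : ∃ m : Nat, ((List.lookup (ch pm person m) hm).isSome ∨ List.lookup (ch pm person m) pm = none) := ⟨i, hTi'⟩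
  have hL := Nat.find_spec hex
  have hmin : ∀ j, j < Nat.find hex →
      ¬((List.lookup (ch pm person j) hm).isSome ∨ List.lookup (ch pm person j) pm = none) :=
    fun j hj => Nat.find_min hex hj
  have hLle : Nat.find hex ≤ pm.length := le_trans (Nat.find_min' hex hTi') (by omega)
  have hch0 : ch pm person 0 = person := rfl
  unfold fh fh_alt
  cases hper : List.lookup person hm with
  | some h =>
    simp only [fhA, lk_eq_lookup, hper]
  | none =>
    cases hpp : List.lookup person pm with
    | none =>
      simp only [fhA, lk_eq_lookup, hper, hpp]
      simp
    | some q =>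
      have hLpos : 0 < Nat.find hex := by
        rcases Nat.eq_zero_or_pos (Nat.find hex) with h0 | h0
        · exfalso
          rw [h0, hch0] at hL
          rcases hL with hc | hr
          · rw [hper] at hc; exact absurd hc (by simp)
          · rw [hpp] at hr; simp at hr
        · exact h0
      -- A's side: the fueled recursion from chain position 0
      have hA : fhA (pm.length + 1) person pm hm =
          (List.lookup (ch pm person (Nat.find hex)) hm).getD 0 + ((Nat.find hex : Nat) : Int) := by
        have := fhA_chain pm hm person (Nat.find hex) hL hmin (pm.length + 1) 0 (by omega) (by omega)
        rw [hch0] at this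
        rw [this]
        simp
      -- B's side: the relaxation table after pm.length passes
      have hinv := passes_invariant pm hm person (Nat.find hex) hnd hL hmin pm.length
      have hknown : (List.range pm.length).foldl
          (fun kn _ => if (List.lookup person kn).isSome then kn else relaxPass pm kn) hm =
          (fun kn => if (List.lookup person kn).isSome then kn else relaxPass pm kn)^[pm.length] hm :=
        foldl_const_range _ pm.length hm
      have hres : (List.lookup person
          ((fun kn => if (List.lookup person kn).isSome then kn else relaxPass pm kn)^[pm.length] hm)).isSome := by
        rcases hinv.2 with hP | hfound
        · have := hP 0 (by omega) hLpos
          rw [hch0] at this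
          exact this
        · exact hfound
      rcases Option.isSome_iff_exists.mp hres with ⟨v, hv⟩
      have hval : v = (List.lookup (ch pm person (Nat.find hex)) hm).getD 0 + ((Nat.find hex : Nat) : Int) := by
        have := hinv.1.2 0 (by omega) v (by rw [hch0]; exact hv)
        rw [this]
        simp
      rw [hA]
      rw [if_neg (by simp : ¬ ((some q : Option Int).isNone = true))]
      rw [hknown]
      show _ = (List.lookup person
        ((fun kn => if (List.lookup person kn).isSome then kn else relaxPass pm kn)^[pm.length] hm)).getD 0
      rw [hv, Option.getD_some, hval]
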